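-- pv_equiv track=rewrite | github.com/Akhan521/Interview-Prep | CodePath TIP-102/Unit 2/Day 1/time_portals.py | num_of_time_portals
-- ===== SOURCE A (Python) =====
-- def num_of_time_portals(portals, destination):
--     # We can use a dictionary to count occurrences of each portal string.
--     counts = {}
--     for portal in portals:
--         counts[portal] = counts.get(portal, 0) + 1
--
--     total_pairs = 0
--     # We iterate through each portal and check if the destination can be formed by concatenating it with another portal.
--     for portal in portals:
--         required_portal = destination[len(portal):]  # The string needed to complete the destination.
--         if destination.startswith(portal) and required_portal in counts:
--             total_pairs += counts[required_portal]
--             # If the required portal is the same as the current portal, we need to subtract one to avoid counting the same portal twice.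
--             if required_portal == portal:
--                 total_pairs -= 1
--
--     return total_pairs
-- ===== SOURCE B (Python) =====
-- def num_of_time_portals(portals, destination):
--     counts = {}
--     for portal in portals:
--         counts[portal] = counts.get(portal, 0) + 1
--     total = 0
--     # Walk the split points of the destination instead of scanning portals with prefix tests.
--     for k in range(len(destination) + 1):
--         left = destination[:k]
--         right = destination[k:]
--         cl = counts.get(left, 0)
--         if left == right:
--             total += cl * (cl - 1)
--         else:
--             total += cl * counts.get(right, 0)
--     return total
-- ===== Notes on version B (the rewrite author's own statement) =====
-- stated objective: alternative
-- what changed: Instead of scanning the portal list and testing each portal as a prefix of the destination, B builds the occurrence counter once and iterates over the len(destination)+1 split points of the destination, multiplying left/right counts (with the self-pair correction when left == right).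
import Mathlib
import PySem

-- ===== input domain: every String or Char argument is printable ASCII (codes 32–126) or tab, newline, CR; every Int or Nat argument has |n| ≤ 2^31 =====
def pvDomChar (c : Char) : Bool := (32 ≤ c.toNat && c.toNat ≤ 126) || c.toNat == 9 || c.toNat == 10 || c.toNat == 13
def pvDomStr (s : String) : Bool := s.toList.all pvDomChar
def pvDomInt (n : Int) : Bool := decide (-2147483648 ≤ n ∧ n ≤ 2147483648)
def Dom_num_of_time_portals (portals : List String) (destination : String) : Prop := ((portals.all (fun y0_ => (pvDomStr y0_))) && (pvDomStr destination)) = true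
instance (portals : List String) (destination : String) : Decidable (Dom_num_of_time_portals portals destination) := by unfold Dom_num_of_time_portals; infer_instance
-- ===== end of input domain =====

-- B iterates the split points of the destination with a prebuilt counter instead of
-- scanning the portal list with prefix tests; objective: alternative algorithm, same result.

-- ===== PORT A =====
def num_of_time_portals (portals : List String) (destination : String) : Int :=
  let counts : PySem.Dict String Int :=
    portals.foldl (fun d portal => d.insert portal (d.getD portal 0 + 1)) PySem.Dict.empty
  portals.foldl (fun total portal =>
    let required := PySem.Str.slice destination (some (PySem.Str.len portal)) none
    if PySem.Str.startswith destination portal && counts.contains required then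
      -- counts[required] cannot raise here: it is guarded by 'required in counts'
      let t := total + counts.getD required 0
      if required == portal then t - 1 else t
    else total) 0

-- ===== PORT B =====
def num_of_time_portals_alt (portals : List String) (destination : String) : Int :=
  let counts : PySem.Dict String Int :=
    portals.foldl (fun d portal => d.insert portal (d.getD portal 0 + 1)) PySem.Dict.empty
  (PySem.List.pyRange 0 (PySem.Str.len destination + 1) 1).foldl (fun total k =>
    let left := PySem.Str.slice destination none (some k)
    let right := PySem.Str.slice destination (some k) none
    let cl := counts.getD left 0
    if left == right then total + cl * (cl - 1)
    else total + cl * counts.getD right 0) 0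

-- ===== PRECONDITION & SPEC =====
def Spec_num_of_time_portals (portals : List String) (destination : String) (out : Int) : Prop := out = num_of_time_portals_alt portals destination
instance (portals : List String) (destination : String) (out : Int) : Decidable (Spec_num_of_time_portals portals destination out) := by unfold Spec_num_of_time_portals; infer_instance

-- ===== CLAIM (what is proved, stated in full; the proofs are below) =====
def Claim_equal_num_of_time_portals : Prop := ∀ (portals : List String) (destination : String), Dom_num_of_time_portals portals destination → Spec_num_of_time_portals portals destination (num_of_time_portals portals destination)

-- ===== LEMMAS AND PROOFS =====

-- occurrence count of a string among the portals, as an Int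
def pvCnt (portals : List String) (s : String) : Int := (portals.count s : Int)

-- the contribution A adds for one occurrence of portal p
def pvGA (portals : List String) (destination : String) (p : String) : Int :=
  if PySem.Str.startswith destination p = true then
    pvCnt portals (PySem.Str.slice destination (some (p.toList.length : Int)) none) -
      (if PySem.Str.slice destination (some (p.toList.length : Int)) none = p then 1 else 0)
  else 0

-- the contribution of split point i, weighted by how often destination[:i] occurs in M
def pvGB (M portals : List String) (destination : String) (i : Nat) : Int :=
  ((List.count (PySem.Str.slice destination none (some (i : Int))) M : Nat) : Int) *
    (pvCnt portals (PySem.Str.slice destination (some (i : Int)) none) -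
      (if PySem.Str.slice destination none (some (i : Int)) = PySem.Str.slice destination (some (i : Int)) none then 1 else 0))

lemma pvLeft_toList (destination : String) (i : Nat) :
    (PySem.Str.slice destination none (some (i : Int))).toList = destination.toList.take i := by
  simp [PySem.Str.toList_slice, PySem.Chars.slice_eq_listSlice, PySem.List.slice_to_natCast]

-- sum of a map that is zero except possibly at index j
lemma pvSum_range_zero (f : Nat → Int) (j m : Nat) (hj : m ≤ j) :
    ((List.range m).map (fun i => if i = j then f i else 0)).sum = 0 := by
  induction m with
  | zero => simp
  | succ m ih =>
      rw [List.range_succ]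
      simp only [List.map_append, List.sum_append, List.map_cons, List.map_nil, List.sum_cons,
        List.sum_nil]
      rw [ih (by omega), if_neg (by omega)]
      ring

lemma pvSum_range_single (f : Nat → Int) (j m : Nat) (hj : j < m) :
    ((List.range m).map (fun i => if i = j then f i else 0)).sum = f j := by
  induction m with
  | zero => omega
  | succ m ih =>
      rw [List.range_succ]
      simp only [List.map_append, List.sum_append, List.map_cons, List.map_nil, List.sum_cons,
        List.sum_nil]
      by_cases h : j = m
      · subst h
        rw [pvSum_range_zero f j j le_rfl, if_pos rfl]; ring
      · rw [ih (by omega), if_neg (by omega)]; ring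

-- the single-hit sum: over all split points, only i = |p| can have destination[:i] = p
lemma pvHit (portals : List String) (destination : String) (p : String) :
    ((List.range (destination.toList.length + 1)).map (fun (i : Nat) =>
      (if PySem.Str.slice destination none (some (i : Int)) = p then (1 : Int) else 0) *
        (pvCnt portals (PySem.Str.slice destination (some (i : Int)) none) -
          (if PySem.Str.slice destination none (some (i : Int)) = PySem.Str.slice destination (some (i : Int)) none then 1 else 0)))).sum
  = pvGA portals destination p := by
  unfold pvGA
  by_cases hs : PySem.Str.startswith destination p = true
  · -- p is a prefix of destination: the only hit is i = p.toList.length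
    have hpre : p.toList <+: destination.toList := by
      rw [PySem.Str.startswith_eq] at hs
      exact (PySem.Chars.startswith_iff _ _).mp hs
    have hlen : p.toList.length ≤ destination.toList.length := hpre.length_le
    have hiff : ∀ i : Nat, i < destination.toList.length + 1 →
        (PySem.Str.slice destination none (some (i : Int)) = p ↔ i = p.toList.length) := by
      intro i hi
      constructor
      · intro h
        have h2 : (PySem.Str.slice destination none (some (i : Int))).toList = p.toList := by rw [h]
        rw [pvLeft_toList] at h2
        have h3 := congrArg List.length h2
        rw [List.length_take] at h3
        omega
      · intro h
        subst h
        rw [← String.toList_inj, pvLeft_toList]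
        exact (List.prefix_iff_eq_take.mp hpre).symm
    rw [if_pos hs]
    have hcong : (List.range (destination.toList.length + 1)).map (fun (i : Nat) =>
        (if PySem.Str.slice destination none (some (i : Int)) = p then (1 : Int) else 0) *
          (pvCnt portals (PySem.Str.slice destination (some (i : Int)) none) -
            (if PySem.Str.slice destination none (some (i : Int)) = PySem.Str.slice destination (some (i : Int)) none then 1 else 0)))
      = (List.range (destination.toList.length + 1)).map (fun (i : Nat) =>
          if i = p.toList.length then
            (pvCnt portals (PySem.Str.slice destination (some (i : Int)) none) -
              (if PySem.Str.slice destination none (some (i : Int)) = PySem.Str.slice destination (some (i : Int)) none then 1 else 0))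
          else 0) := by
      apply List.map_congr_left
      intro i hi
      rw [List.mem_range] at hi
      by_cases h : PySem.Str.slice destination none (some (i : Int)) = p
      · rw [if_pos h, if_pos ((hiff i hi).mp h), one_mul]
      · rw [if_neg h, if_neg (fun he => h ((hiff i hi).mpr he)), zero_mul]
    rw [hcong, pvSum_range_single _ _ _ (by omega)]
    have hLp : PySem.Str.slice destination none (some ((p.toList.length : Nat) : Int)) = p :=
      (hiff p.toList.length (by omega)).mpr rfl
    rw [hLp]
    congr 1
    by_cases h : p = PySem.Str.slice destination (some ((p.toList.length : Nat) : Int)) none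
    · rw [if_pos h, if_pos h.symm]
    · rw [if_neg h, if_neg (fun he => h he.symm)]
  · -- p is not a prefix: no split point hits, the sum is 0
    rw [if_neg hs]
    have hnpre : ¬ p.toList <+: destination.toList := by
      intro h
      rw [PySem.Str.startswith_eq] at hs
      exact hs ((PySem.Chars.startswith_iff _ _).mpr h)
    have hcong : (List.range (destination.toList.length + 1)).map (fun (i : Nat) =>
        (if PySem.Str.slice destination none (some (i : Int)) = p then (1 : Int) else 0) *
          (pvCnt portals (PySem.Str.slice destination (some (i : Int)) none) -
            (if PySem.Str.slice destination none (some (i : Int)) = PySem.Str.slice destination (some (i : Int)) none then 1 else 0)))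
      = (List.range (destination.toList.length + 1)).map (fun (_ : Nat) => (0 : Int)) := by
      apply List.map_congr_left
      intro i _
      have h : ¬ PySem.Str.slice destination none (some (i : Int)) = p := by
        intro h
        apply hnpre
        rw [← String.toList_inj, pvLeft_toList] at h
        rw [← h]
        exact List.take_prefix i destination.toList
      rw [if_neg h, zero_mul]
    rw [hcong]
    simp

-- the split-point identity: per-portal contributions summed over any list M equal
-- the split sums weighted by M's occurrence counts
lemma pvKey (portals : List String) (destination : String) (M : List String) :
    (M.map (pvGA portals destination)).sum
  = ((List.range (destination.toList.length + 1)).map (pvGB M portals destination)).sum := by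
  induction M with
  | nil =>
      simp only [List.map_nil, List.sum_nil]
      have hz : ∀ i ∈ List.range (destination.toList.length + 1),
          pvGB [] portals destination i = (fun (_ : Nat) => (0 : Int)) i := by
        intro i _; unfold pvGB; simp
      rw [List.map_congr_left hz]
      simp
  | cons p M ih =>
      simp only [List.map_cons, List.sum_cons]
      rw [ih]
      have hsplit : (List.range (destination.toList.length + 1)).map (pvGB (p :: M) portals destination)
        = (List.range (destination.toList.length + 1)).map (fun (i : Nat) =>
            pvGB M portals destination i
          + (if PySem.Str.slice destination none (some (i : Int)) = p then (1 : Int) else 0) *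
              (pvCnt portals (PySem.Str.slice destination (some (i : Int)) none) -
                (if PySem.Str.slice destination none (some (i : Int)) = PySem.Str.slice destination (some (i : Int)) none then 1 else 0))) := by
        apply List.map_congr_left
        intro i _
        unfold pvGB
        rw [List.count_cons, ← add_mul]
        congr 1
        push_cast
        congr 1
        by_cases h : p = PySem.Str.slice destination none (some (i : Int))
        · rw [if_pos (by exact beq_iff_eq.mpr h), if_pos h.symm]
        · rw [if_neg (by simpa using h), if_neg (fun he => h he.symm)]
      rw [hsplit, List.sum_map_add, pvHit portals destination p]
      ring

-- A's scan reduces to the sum of per-portal contributions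
lemma pvA_eq (portals : List String) (destination : String) :
    num_of_time_portals portals destination = (portals.map (pvGA portals destination)).sum := by
  unfold num_of_time_portals
  rw [PySem.Dict.foldl_insert_getD_add_one_eq_counter]
  show List.foldl
      (fun (total : Int) (portal : String) =>
        if (PySem.Str.startswith destination portal &&
            (PySem.Dict.counter portals).contains (PySem.Str.slice destination (some (PySem.Str.len portal)) none)) = true then
          if (PySem.Str.slice destination (some (PySem.Str.len portal)) none == portal) = true then
            total + (PySem.Dict.counter portals).getD (PySem.Str.slice destination (some (PySem.Str.len portal)) none) 0 - 1
          else total + (PySem.Dict.counter portals).getD (PySem.Str.slice destination (some (PySem.Str.len portal)) none) 0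
        else total)
      0 portals = _
  rw [PySem.List.foldl_congr_mem portals _
    (fun (total : Int) (p : String) => total + pvGA portals destination p) 0 ?hc]
  · rw [PySem.List.foldl_add, zero_add]
  case hc =>
    intro acc p hp
    simp only [PySem.Str.len_eq]
    unfold pvGA
    by_cases hs : PySem.Str.startswith destination p = true
    · by_cases hc' : (PySem.Dict.counter portals).contains
          (PySem.Str.slice destination (some ((p.toList.length : Nat) : Int)) none) = true
      · rw [if_pos (by rw [hs, hc']; rfl), if_pos hs, PySem.Dict.getD_counter]
        by_cases h : PySem.Str.slice destination (some ((p.toList.length : Nat) : Int)) none = p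
        · rw [if_pos (beq_iff_eq.mpr h), if_pos h]
          unfold pvCnt; ring
        · rw [if_neg (by simpa using h), if_neg h]
          unfold pvCnt; ring
      · have hmem : PySem.Str.slice destination (some ((p.toList.length : Nat) : Int)) none ∉ portals := by
          intro hm
          exact hc' (by rw [PySem.Dict.contains_counter]; exact List.contains_iff_mem.mpr hm)
        have hcount : ((List.count (PySem.Str.slice destination (some ((p.toList.length : Nat) : Int)) none) portals : Nat) : Int) = 0 := by
          rw [List.count_eq_zero.mpr hmem]; simp
        have hne : ¬ PySem.Str.slice destination (some ((p.toList.length : Nat) : Int)) none = p := by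
          intro h
          exact hmem (by rw [h]; exact hp)
        rw [if_neg (fun hand => hc' ((Bool.and_eq_true _ _).mp hand).2), if_pos hs, if_neg hne]
        unfold pvCnt
        rw [hcount]
        ring
    · rw [if_neg (by rw [eq_false_of_ne_true hs]; simp), if_neg hs]
      ring

-- B's split-point loop reduces to the weighted split sum
lemma pvB_eq (portals : List String) (destination : String) :
    num_of_time_portals_alt portals destination
  = ((List.range (destination.toList.length + 1)).map (pvGB portals portals destination)).sum := by
  unfold num_of_time_portals_alt
  rw [PySem.Dict.foldl_insert_getD_add_one_eq_counter]
  show List.foldl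
      (fun (total : Int) (k : Int) =>
        if (PySem.Str.slice destination none (some k) == PySem.Str.slice destination (some k) none) = true then
          total + (PySem.Dict.counter portals).getD (PySem.Str.slice destination none (some k)) 0 *
            ((PySem.Dict.counter portals).getD (PySem.Str.slice destination none (some k)) 0 - 1)
        else
          total + (PySem.Dict.counter portals).getD (PySem.Str.slice destination none (some k)) 0 *
            (PySem.Dict.counter portals).getD (PySem.Str.slice destination (some k) none) 0)
      0 (PySem.List.pyRange 0 (PySem.Str.len destination + 1) 1) = _
  rw [PySem.Str.len_eq]
  rw [show ((destination.toList.length : Int) + 1) = ((destination.toList.length + 1 : Nat) : Int) by push_cast; ring]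
  rw [PySem.List.pyRange_one]
  simp only [sub_zero, Int.toNat_natCast, List.foldl_map, zero_add]
  rw [PySem.List.foldl_congr_mem (List.range (destination.toList.length + 1)) _
    (fun (total : Int) (i : Nat) => total + pvGB portals portals destination i) 0 ?hb]
  · rw [PySem.List.foldl_add, zero_add]
  case hb =>
    intro acc i _
    show _ = acc + pvGB portals portals destination i
    unfold pvGB pvCnt
    rw [PySem.Dict.getD_counter, PySem.Dict.getD_counter]
    by_cases h : PySem.Str.slice destination none (some (i : Int)) = PySem.Str.slice destination (some (i : Int)) none
    · rw [if_pos (beq_iff_eq.mpr h), if_pos h, ← h]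
    · rw [if_neg (by simpa using h), if_neg h]
      ring

-- ===== VERDICT (by name: the statement is the Claim_ definition above) =====
theorem num_of_time_portals_spec : Claim_equal_num_of_time_portals := by
  intro portals destination _
  unfold Spec_num_of_time_portals
  rw [pvA_eq, pvB_eq]
  exact pvKey portals destination portals
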